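-- pv_equiv track=rewrite | github.com/FlipperDripper/otus_algorithms | src/hw3/rook.py | rook_movement
-- ===== SOURCE A (Python) =====
-- def rook_movement(k):
--     position = 1 << k
--     x, y = k % 8, k // 8
--     mask = 0
--
--     for i in range(x, 0, -1):
--         mask = mask | (position >> i)
--     for i in range(1, 8 - x):
--         mask = mask | (position << i)
--     for i in range(y, 0, -1):
--         mask = mask | (position >> (8 * i))
--     for i in range (1, 8 - y):
--         mask = mask | (position << (8 * i))
--
--     return mask, 14
-- ===== SOURCE B (Python) =====
-- FILE_A = 0x0101010101010101  # one bit per rank in file a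
--
--
-- def rook_movement(k):
--     position = 1 << k
--     x, y = k % 8, k // 8
--     row = 0xFF << (8 * y)                                 # the whole rank of the square
--     below = (((1 << (8 * y)) - 1) // 0xFF) << x           # file squares on the ranks below
--     above = (FILE_A << x) & ~((1 << (8 * (y + 1))) - 1)   # file squares on the ranks above, within the board
--     return (row | below | above) & ~position, 14
-- ===== Notes on version B (the rewrite author's own statement) =====
-- stated objective: faster
-- what changed: Replaces the four scanning loops (each ORing in one attacked square at a time) with a closed-form mask: the rank byte shifted to the square's row, the file repunit for the ranks below, and the file constant masked to the ranks above, with the square's own bit cleared; Pre_ excludes only negative k, where A's left shift by a negative amount raises ValueError.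
import Mathlib
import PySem

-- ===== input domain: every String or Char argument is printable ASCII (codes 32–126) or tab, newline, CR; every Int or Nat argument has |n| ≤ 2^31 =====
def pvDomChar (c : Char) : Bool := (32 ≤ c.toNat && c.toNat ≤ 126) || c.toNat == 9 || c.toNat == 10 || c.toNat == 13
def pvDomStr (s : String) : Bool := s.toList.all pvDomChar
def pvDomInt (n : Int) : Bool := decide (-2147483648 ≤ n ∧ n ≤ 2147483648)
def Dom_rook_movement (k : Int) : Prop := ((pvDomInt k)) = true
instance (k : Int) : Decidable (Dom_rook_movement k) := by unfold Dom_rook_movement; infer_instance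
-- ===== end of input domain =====

-- B replaces A's four square-by-square scanning loops by a closed-form mask built
-- from the rank byte, the file squares below, and the file squares above on the board.

-- ===== PORT A =====
def rook_movement (k : Int) : Int × Int :=
  let position : Int := 1 <<< k.toNat
  let x : Int := PySem.Int.mod k 8
  let y : Int := PySem.Int.floordiv k 8
  let mask : Int := 0
  let mask := (PySem.List.pyRange x 0 (-1)).foldl
    (fun mask i => PySem.Int.bor mask (position >>> i.toNat)) mask
  let mask := (PySem.List.pyRange 1 (8 - x) 1).foldl
    (fun mask i => PySem.Int.bor mask (position <<< i.toNat)) mask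
  let mask := (PySem.List.pyRange y 0 (-1)).foldl
    (fun mask i => PySem.Int.bor mask (position >>> (8 * i).toNat)) mask
  let mask := (PySem.List.pyRange 1 (8 - y) 1).foldl
    (fun mask i => PySem.Int.bor mask (position <<< (8 * i).toNat)) mask
  (mask, 14)

-- ===== PORT B =====
def rook_movement_alt (k : Int) : Int × Int :=
  let position : Int := 1 <<< k.toNat
  let x : Int := PySem.Int.mod k 8
  let y : Int := PySem.Int.floordiv k 8
  let row : Int := 255 <<< (8 * y).toNat
  let below : Int := (PySem.Int.floordiv ((1 <<< (8 * y).toNat) - 1) 255) <<< x.toNat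
  let above : Int :=
    PySem.Int.band (72340172838076673 <<< x.toNat)
      (Int.not ((1 <<< (8 * (y + 1)).toNat) - 1))
  (PySem.Int.band (PySem.Int.bor (PySem.Int.bor row below) above) (Int.not position), 14)

-- ===== PRECONDITION & SPEC =====
-- Pre_ excludes exactly the inputs on which A raises: a negative k makes A's left shift raise ValueError.
def Pre_rook_movement (k : Int) : Prop := 0 ≤ k
instance (k : Int) : Decidable (Pre_rook_movement k) := by unfold Pre_rook_movement; infer_instance
def pvWitness_rook_movement : Int := 27

def Spec_rook_movement (k : Int) (out : Int × Int) : Prop := out = rook_movement_alt k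
instance (k : Int) (out : Int × Int) : Decidable (Spec_rook_movement k out) := by unfold Spec_rook_movement; infer_instance

-- ===== CLAIM (what is proved, stated in full; the proofs are below) =====
def Claim_equal_rook_movement : Prop := ∀ (k : Int), Dom_rook_movement k → Pre_rook_movement k → Spec_rook_movement k (rook_movement k)

-- ===== LEMMAS AND PROOFS =====

-- byte repunit: one set bit per rank, ranks 0..m-1
def rep : Nat → Nat
  | 0 => 0
  | m + 1 => 2 ^ 8 * rep m + 1

lemma rep_mul (m : Nat) : 255 * rep m = 2 ^ (8 * m) - 1 := by
  induction m with
  | zero => simp [rep]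
  | succ m ih =>
    have h1 : (1:Nat) ≤ 2 ^ (8 * m) := Nat.one_le_two_pow
    have h2 : 2 ^ (8 * (m+1)) = 2 ^ 8 * 2 ^ (8 * m) := by ring
    simp only [rep]
    omega

lemma rep_div (m : Nat) : (2 ^ (8 * m) - 1) / 255 = rep m := by
  rw [← rep_mul m, Nat.mul_div_cancel_left _ (by norm_num)]

lemma rep_testBit (m : Nat) : ∀ b, (rep m).testBit b = (decide (b < 8 * m) && decide (b % 8 = 0)) := by
  induction m with
  | zero => intro b; simp [rep]
  | succ m ih =>
    intro b
    have h := Nat.testBit_two_pow_mul_add (rep m) (b := 1) (i := 8) (by norm_num) b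
    simp only [rep, h]
    have h1 : Nat.testBit 1 b = decide (b = 0) := by
      rcases b with _ | b
      · decide
      · simp [Nat.testBit_succ]
    by_cases hb : b < 8
    · simp only [if_pos hb, h1, ← Bool.decide_and, decide_eq_decide]
      omega
    · simp only [if_neg hb, ih (b - 8), ← Bool.decide_and, decide_eq_decide]
      omega

lemma foldl_bor_natCast (l : List Int) (g : Int → Nat) : ∀ (m : Nat),
    l.foldl (fun acc i => PySem.Int.bor acc ↑(g i)) (↑m : Int)
      = ↑(l.foldl (fun acc i => acc ||| g i) m) := by
  induction l with
  | nil => intro m; rfl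
  | cons a l ih => intro m; simp only [List.foldl_cons, PySem.Int.bor_natCast, ih]

lemma testBit_foldl_or (l : List Int) (g : Int → Nat) (b : Nat) : ∀ (m : Nat),
    (l.foldl (fun acc i => acc ||| g i) m).testBit b
      = (m.testBit b || l.any (fun i => (g i).testBit b)) := by
  induction l with
  | nil => intro m; simp
  | cons a l ih => intro m; simp [List.foldl_cons, ih, Bool.or_assoc]

lemma add_two_pow_of_testBit_false (a n : Nat) (h : a.testBit n = false) :
    a + 2 ^ n = a ||| 2 ^ n := by
  apply Nat.eq_of_testBit_eq
  intro j
  set hi := a / 2 ^ (n+1) with hhi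
  set lo := a % 2 ^ (n+1) with hlo
  have hpos : 0 < 2 ^ (n+1) := Nat.two_pow_pos _
  have h1 : 2 ^ (n+1) * hi + lo = a := Nat.div_add_mod a _
  have hlt : lo < 2 ^ (n+1) := Nat.mod_lt _ hpos
  have hln : lo.testBit n = false := by
    rw [hlo, Nat.testBit_mod_two_pow]
    simp [h]
  have hpow : 2 ^ (n+1) = 2 * 2 ^ n := by ring
  have hlo8 : lo < 2 ^ n := by
    by_contra hc
    rw [not_lt] at hc
    have : lo / 2 ^ n = 1 := Nat.div_eq_of_lt_le (by omega) (by omega)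
    rw [Nat.testBit_eq_decide_div_mod_eq, this] at hln
    simp at hln
  have h2 : a + 2 ^ n = 2 ^ (n+1) * hi + (lo + 2 ^ n) := by omega
  have h3 : (a + 2 ^ n).testBit j = if j < n+1 then (lo + 2 ^ n).testBit j else hi.testBit (j - (n+1)) := by
    rw [h2]; exact Nat.testBit_two_pow_mul_add hi (by omega) j
  have h4 : a.testBit j = if j < n+1 then lo.testBit j else hi.testBit (j - (n+1)) := by
    rw [← h1]; exact Nat.testBit_two_pow_mul_add hi (by omega) j
  have h5 : (lo + 2 ^ n).testBit j = if j < n then lo.testBit j else Nat.testBit 1 (j - n) := by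
    rw [show lo + 2 ^ n = 2 ^ n * 1 + lo by ring]
    exact Nat.testBit_two_pow_mul_add 1 hlo8 j
  rw [Nat.testBit_lor, h3, h4]
  by_cases hj : j < n + 1
  · rw [if_pos hj, if_pos hj, h5]
    by_cases hjn : j = n
    · subst hjn
      simp [hln]
    · rw [if_pos (by omega), Nat.testBit_two_pow_of_ne (by omega)]
      simp
  · rw [if_neg hj, if_neg hj, Nat.testBit_two_pow_of_ne (by omega)]
    simp

lemma sub_two_pow_of_testBit_true (m n : Nat) (h : m.testBit n = true) :
    m - 2 ^ n = m ^^^ 2 ^ n := by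
  have h2 : (m ^^^ 2 ^ n).testBit n = false := by
    simp [Nat.testBit_xor, h]
  have h3 := add_two_pow_of_testBit_false _ n h2
  have h4 : (m ^^^ 2 ^ n) ||| 2 ^ n = m := by
    apply Nat.eq_of_testBit_eq
    intro j
    by_cases hj : n = j
    · subst hj; simp [h]
    · simp [Nat.testBit_xor, Nat.testBit_two_pow_of_ne hj]
  omega

-- clearing the low t bits: a - a % 2^t keeps exactly the bits at positions ≥ t
lemma sub_mod_testBit (a t b : Nat) :
    (a - a % 2 ^ t).testBit b = (decide (t ≤ b) && a.testBit b) := by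
  have h : a - a % 2 ^ t = (a / 2 ^ t) <<< t := by
    rw [Nat.shiftLeft_eq, Nat.mul_comm]
    have := Nat.div_add_mod a (2 ^ t)
    omega
  rw [h, Nat.testBit_shiftLeft, Nat.testBit_div_two_pow]
  by_cases ht : t ≤ b
  · simp [ht, Nat.sub_add_cancel ht]
  · simp [ht]

-- general band-with-complement on casts: Python's  a & ~c  for naturals a, c
lemma band_not_natCast (a c : Nat) :
    PySem.Int.band ↑a (Int.not ↑c) = ↑(a - (a &&& c)) := by
  have hnot : Int.not ((c : Nat) : Int) = Int.negSucc c := rfl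
  rw [hnot]
  show PySem.Int.band (Int.ofNat a) (Int.negSucc c) = _
  rw [PySem.Int.band]
  have c1 : (0:Int) ≤ Int.ofNat a := Int.natCast_nonneg a
  have c2 : ¬ ((0:Int) ≤ Int.negSucc c) := by
    have := Int.negSucc_lt_zero c
    omega
  rw [if_pos c1, if_neg c2]
  have e1 : (Int.ofNat a).toNat = a := rfl
  have e2 : (-(Int.negSucc c) - 1).toNat = c := by
    rw [Int.neg_negSucc]
    omega
  rw [e1, e2]

def natMaskA (n : Nat) : Nat :=
  let p := 2 ^ n
  let m : Nat := 0
  let m := (PySem.List.pyRange (↑(n % 8)) 0 (-1)).foldl (fun m i => m ||| (p >>> i.toNat)) m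
  let m := (PySem.List.pyRange 1 (8 - ↑(n % 8)) 1).foldl (fun m i => m ||| (p <<< i.toNat)) m
  let m := (PySem.List.pyRange (↑(n / 8)) 0 (-1)).foldl (fun m i => m ||| (p >>> (8 * i).toNat)) m
  (PySem.List.pyRange 1 (8 - ↑(n / 8)) 1).foldl (fun m i => m ||| (p <<< (8 * i).toNat)) m

-- Nat-level value of B: rank byte, file repunit below, file constant masked above, square cleared
def maskM (n : Nat) : Nat :=
  ((255 <<< (8 * (n / 8))) ||| (rep (n / 8) <<< (n % 8))) |||
    ((rep 8 <<< (n % 8)) - ((rep 8 <<< (n % 8)) &&& (2 ^ (8 * (n / 8 + 1)) - 1)))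

def natB (n : Nat) : Nat := maskM n - (maskM n &&& 2 ^ n)

lemma cast_shiftR (p t : Nat) : ((p:Int) >>> ((t:Nat):Int)) = ((p >>> t : Nat) : Int) := by
  simp [Nat.shiftRight_eq_div_pow]

lemma cast_shiftL (p t : Nat) : ((p:Int) <<< ((t:Nat):Int)) = ((p <<< t : Nat) : Int) := by
  simp [Nat.shiftLeft_eq]

lemma portA_eq (n : Nat) : rook_movement ↑n = (↑(natMaskA n), 14) := by
  have hm : PySem.Int.mod (↑n) 8 = ↑(n % 8) := by exact_mod_cast PySem.Int.mod_natCast n 8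
  have hd : PySem.Int.floordiv (↑n) 8 = ↑(n / 8) := by exact_mod_cast PySem.Int.floordiv_natCast n 8
  simp only [rook_movement, natMaskA, hm, hd, Int.toNat_natCast,
    cast_shiftR, cast_shiftL, Nat.one_shiftLeft, show (0:Int) = ((0:Nat):Int) from rfl,
    foldl_bor_natCast]

lemma testBit_maskM (n b : Nat) :
    (maskM n).testBit b =
      decide ((8 * (n / 8) ≤ b ∧ b < 8 * (n / 8) + 8) ∨
        (b % 8 = n % 8 ∧ b < n) ∨
        (b % 8 = n % 8 ∧ 8 * (n / 8) + 8 ≤ b ∧ b < 64 + n % 8)) := by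
  have hx8 : n % 8 < 8 := Nat.mod_lt _ (by norm_num)
  have hnd : 8 * (n / 8) + n % 8 = n := by omega
  rw [Bool.eq_iff_iff]
  rw [maskM, show ((rep 8 <<< (n % 8)) &&& (2 ^ (8 * (n / 8 + 1)) - 1))
      = (rep 8 <<< (n % 8)) % 2 ^ (8 * (n / 8 + 1)) from
      Nat.and_two_pow_sub_one_eq_mod _ _]
  simp only [Nat.testBit_lor, sub_mod_testBit, Nat.testBit_shiftLeft, rep_testBit,
    show (255:Nat) = 2 ^ 8 - 1 from rfl, Nat.testBit_two_pow_sub_one,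
    Bool.or_eq_true, Bool.and_eq_true, decide_eq_true_eq, ge_iff_le]
  omega

lemma maskM_bit (n : Nat) : (maskM n).testBit n = true := by
  rw [testBit_maskM]
  exact decide_eq_true (Or.inl (by omega))

lemma testBit_natB (n b : Nat) :
    (natB n).testBit b = (decide (b ≠ n) && (maskM n).testBit b) := by
  have hand : maskM n &&& 2 ^ n = 2 ^ n := by
    apply Nat.eq_of_testBit_eq
    intro j
    rw [Nat.testBit_and]
    by_cases hj : n = j
    · subst hj; simp [maskM_bit]
    · simp [Nat.testBit_two_pow_of_ne hj]
  rw [natB, hand, sub_two_pow_of_testBit_true _ _ (maskM_bit n), Nat.testBit_xor]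
  by_cases hb : b = n
  · subst hb; simp [maskM_bit]
  · simp [Nat.testBit_two_pow_of_ne (fun h => hb h.symm), hb]

lemma portB_eq (n : Nat) : rook_movement_alt ↑n = (↑(natB n), 14) := by
  have hm : PySem.Int.mod (↑n) 8 = ↑(n % 8) := by exact_mod_cast PySem.Int.mod_natCast n 8
  have hd : PySem.Int.floordiv (↑n) 8 = ↑(n / 8) := by exact_mod_cast PySem.Int.floordiv_natCast n 8
  have ht1 : ((8:Int) * ↑(n / 8)).toNat = 8 * (n / 8) := by omega
  have ht2 : ((8:Int) * (↑(n / 8) + 1)).toNat = 8 * (n / 8 + 1) := by omega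
  have hsub1 : ((2 ^ (8 * (n / 8)) : Nat) : Int) - 1 = ((2 ^ (8 * (n / 8)) - 1 : Nat) : Int) := by
    have : (1:Nat) ≤ 2 ^ (8 * (n / 8)) := Nat.one_le_two_pow
    omega
  have hsub2 : ((2 ^ (8 * (n / 8 + 1)) : Nat) : Int) - 1
      = ((2 ^ (8 * (n / 8 + 1)) - 1 : Nat) : Int) := by
    have : (1:Nat) ≤ 2 ^ (8 * (n / 8 + 1)) := Nat.one_le_two_pow
    omega
  have hdiv := PySem.Int.floordiv_natCast (2 ^ (8 * (n / 8)) - 1) 255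
  rw [rep_div] at hdiv
  have h255 : (255 : Int) = ((255 : Nat) : Int) := rfl
  rw [rook_movement_alt]
  simp only [hm, hd, Int.toNat_natCast, ht1, ht2, Nat.one_shiftLeft, h255,
    hsub1, hsub2, hdiv, band_not_natCast]
  simp only [← Int.natCast_shiftLeft, PySem.Int.bor_natCast]
  rw [band_not_natCast]
  norm_num [natB, maskM, rep]

lemma testBit_natMaskA (n b : Nat) :
    (natMaskA n).testBit b =
      decide ((8 * (n / 8) ≤ b ∧ b < n) ∨ (n < b ∧ b < 8 * (n / 8) + 8) ∨
        (b % 8 = n % 8 ∧ b < n) ∨ (b % 8 = n % 8 ∧ n < b ∧ b ≤ 56 + n % 8)) := by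
  have hx8 : n % 8 < 8 := Nat.mod_lt _ (by norm_num)
  have hnd : 8 * (n / 8) + n % 8 = n := by omega
  rw [Bool.eq_iff_iff]
  simp only [natMaskA, testBit_foldl_or, Nat.zero_testBit, Bool.false_or, Bool.or_eq_true,
    List.any_eq_true, PySem.List.mem_pyRange_neg_one, PySem.List.mem_pyRange_one,
    Nat.testBit_shiftRight, Nat.testBit_shiftLeft, Nat.testBit_two_pow,
    Bool.and_eq_true, decide_eq_true_eq, ge_iff_le]
  constructor
  · rintro (⟨i, hi, h⟩ | ⟨i, hi, h⟩ | ⟨i, hi, h⟩ | ⟨i, hi, h⟩) <;> omega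
  · rintro (h | h | h | h)
    · exact Or.inl (Or.inl (Or.inl ⟨(n:Int) - b, ⟨by omega, by omega⟩, by omega⟩))
    · exact Or.inl (Or.inl (Or.inr ⟨(b:Int) - n, ⟨by omega, by omega⟩, by omega, by omega⟩))
    · exact Or.inl (Or.inr ⟨(((n - b) / 8 : Nat) : Int), ⟨by omega, by omega⟩, by omega⟩)
    · exact Or.inr ⟨(((b - n) / 8 : Nat) : Int), ⟨by omega, by omega⟩, by omega, by omega⟩

lemma natMaskA_eq_natB (n : Nat) : natMaskA n = natB n := by
  apply Nat.eq_of_testBit_eq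
  intro b
  have hx8 : n % 8 < 8 := Nat.mod_lt _ (by norm_num)
  rw [testBit_natMaskA, testBit_natB, testBit_maskM, ← Bool.decide_and, decide_eq_decide]
  omega

-- ===== VERDICT (by name: the statement is the Claim_ definition above) =====
theorem rook_movement_spec : Claim_equal_rook_movement := by
  intro k _ hpre
  have hk : k = ((k.toNat : Nat) : Int) := (Int.toNat_of_nonneg hpre).symm
  rw [Spec_rook_movement, hk, portA_eq, portB_eq, natMaskA_eq_natB]
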